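-- pv_equiv track=rewrite | github.com/dust-killer/classroom-searching | find path.py | pool_map
-- ===== SOURCE A (Python) =====
-- POOL_SIZE = 20
--
-- def pool_map(map_data):
--     """
--     对地图数据进行池化处理
--
--     :param map_data: 输入的地图数据，是一个二维列表
--     :return: 池化后的地图数据，也是一个二维列表
--     """
--     rows = len(map_data)
--     cols = len(map_data[0])
--     pooled_map = []
--     for i in range(0, rows, POOL_SIZE):
--         row = []
--         for j in range(0, cols, POOL_SIZE):
--             sub_map = [map_data[ii][jj] for ii in range(i, min(i + POOL_SIZE, rows)) for jj in
--                        range(j, min(j + POOL_SIZE, cols))]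
--             if any(cell == 2 for cell in sub_map):
--                 row.append(2)
--             else:
--                 row.append(0)
--         pooled_map.append(row)
--     return pooled_map
-- ===== SOURCE B (Python) =====
-- POOL_SIZE = 20
--
--
-- def pool_map(map_data):
--     """Pool column-wise per row first, then combine row groups (two-stage pooling)."""
--     cols = len(map_data[0])
--     col_starts = range(0, cols, POOL_SIZE)
--     row_masks = [[2 if 2 in row[:cols][b:b + POOL_SIZE] else 0 for b in col_starts]
--                  for row in map_data]
--     pooled = []
--     for r in range(0, len(map_data), POOL_SIZE):
--         group = row_masks[r:r + POOL_SIZE]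
--         pooled.append([2 if any(mask[k] == 2 for mask in group) else 0
--                        for k in range(len(col_starts))])
--     return pooled
-- ===== Notes on version B (the rewrite author's own statement) =====
-- stated objective: alternative
-- what changed: B pools in two separable stages - first a per-row pass producing column-block masks, then a pass combining groups of 20 row masks - instead of A's gather of a full 20x20 sub-map list per output cell.
import Mathlib
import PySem

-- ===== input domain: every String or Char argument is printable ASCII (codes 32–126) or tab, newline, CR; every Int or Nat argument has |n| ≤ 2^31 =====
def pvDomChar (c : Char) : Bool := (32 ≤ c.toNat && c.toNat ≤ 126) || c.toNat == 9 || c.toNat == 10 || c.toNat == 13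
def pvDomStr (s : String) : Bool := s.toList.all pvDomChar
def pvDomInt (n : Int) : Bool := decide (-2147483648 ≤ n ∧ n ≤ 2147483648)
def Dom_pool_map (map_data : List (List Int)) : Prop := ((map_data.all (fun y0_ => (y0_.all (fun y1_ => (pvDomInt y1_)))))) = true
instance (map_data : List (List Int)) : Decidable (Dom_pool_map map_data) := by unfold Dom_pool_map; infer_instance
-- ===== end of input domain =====

-- B pools in two stages (per-row column masks, then row groups) instead of gathering each block's sub-map; objective: alternative decomposition.

-- ===== PORT A =====
def pool_map (map_data : List (List Int)) : List (List Int) :=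
  let rows : Int := map_data.length
  let cols : Int := (PySem.List.pyGetD map_data 0 []).length
  (PySem.List.pyRange 0 rows 20).foldl (fun pooled i =>
    let row := (PySem.List.pyRange 0 cols 20).foldl (fun row j =>
      let sub := (PySem.List.pyRange i (min (i + 20) rows) 1).flatMap (fun ii =>
        (PySem.List.pyRange j (min (j + 20) cols) 1).map (fun jj =>
          PySem.List.pyGetD (PySem.List.pyGetD map_data ii []) jj 0))
      if sub.any (fun c => c == 2) then row ++ [2] else row ++ [0]) []
    pooled ++ [row]) []

-- ===== PORT B =====
def pool_map_alt (map_data : List (List Int)) : List (List Int) :=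
  let cols : Int := (PySem.List.pyGetD map_data 0 []).length
  let col_starts := PySem.List.pyRange 0 cols 20
  let row_masks := map_data.map (fun row =>
    col_starts.map (fun b =>
      if (PySem.List.slice (PySem.List.slice row (some 0) (some cols)) (some b) (some (b + 20))).contains 2
      then (2 : Int) else 0))
  (PySem.List.pyRange 0 (map_data.length : Int) 20).foldl (fun pooled r =>
    let group := PySem.List.slice row_masks (some r) (some (r + 20))
    pooled ++ [(List.range col_starts.length).map (fun (k : Nat) =>
      if group.any (fun mask => PySem.List.pyGetD mask (k : Int) 0 == 2) then (2 : Int) else 0)]) []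

-- ===== PRECONDITION & SPEC =====
-- Pre_ excludes exactly the inputs where A raises IndexError: the empty map (map_data[0]) and
-- ragged maps with a row shorter than the first row (map_data[ii][jj] with jj < cols).
def Pre_pool_map (map_data : List (List Int)) : Prop :=
  map_data ≠ [] ∧ ∀ row ∈ map_data, (map_data.headD []).length ≤ row.length
instance (map_data : List (List Int)) : Decidable (Pre_pool_map map_data) := by
  unfold Pre_pool_map; infer_instance
def pvWitness_pool_map : List (List Int) := [[0, 2], [1, 0]]

def Spec_pool_map (map_data : List (List Int)) (out : List (List Int)) : Prop := out = pool_map_alt map_data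
instance (map_data : List (List Int)) (out : List (List Int)) : Decidable (Spec_pool_map map_data out) := by unfold Spec_pool_map; infer_instance

-- ===== CLAIM (what is proved, stated in full; the proofs are below) =====
def Claim_equal_pool_map : Prop := ∀ (map_data : List (List Int)), Dom_pool_map map_data → Pre_pool_map map_data → Spec_pool_map map_data (pool_map map_data)
-- ===== LEMMAS AND PROOFS =====

-- A window scan over indices [i, min(i+20, c)) of xs equals a scan over the 20-element slice of xs.take c.
lemma window_any {α : Type} (xs : List α) (q : α → Bool) (d : α) (i c : Nat) (hc : c ≤ xs.length) :
    (PySem.List.pyRange (i : Int) (min ((i : Int) + 20) (c : Int)) 1).any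
        (fun t => q (PySem.List.pyGetD xs t d))
      = (((xs.take c).drop i).take 20).any q := by
  have hlen : ((((xs.take c).drop i).take 20)).length = min 20 (c - i) := by
    simp [List.length_take, List.length_drop, Nat.min_eq_left hc]
  rw [Bool.eq_iff_iff]
  simp only [List.any_eq_true]
  constructor
  · rintro ⟨t, ht, hq⟩
    rw [PySem.List.mem_pyRange_one] at ht
    obtain ⟨hle, hlt⟩ := ht
    have h0 : (0:Int) ≤ t := le_trans (Int.natCast_nonneg i) hle
    have htc : t < (c : Int) := lt_of_lt_of_le hlt (min_le_right _ _)
    have ht20 : t < (i : Int) + 20 := lt_of_lt_of_le hlt (min_le_left _ _)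
    rw [PySem.List.pyGetD_eq_getElem xs d h0 (by omega)] at hq
    refine ⟨xs[t.toNat], ?_, hq⟩
    rw [List.mem_iff_getElem]
    refine ⟨t.toNat - i, by omega, ?_⟩
    simp only [List.getElem_take, List.getElem_drop]
    congr 1
    omega
  · rintro ⟨y, hy, hq⟩
    rw [List.mem_iff_getElem] at hy
    obtain ⟨u, hu, hyu⟩ := hy
    rw [hlen] at hu
    refine ⟨(i : Int) + u, ?_, ?_⟩
    · rw [PySem.List.mem_pyRange_one]
      constructor
      · omega
      · omega
    · rw [PySem.List.pyGetD_eq_getElem xs d (by omega) (by omega)]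
      have he : xs[((i:Int)+u).toNat]'(by omega) = y := by
        rw [← hyu]
        simp only [List.getElem_take, List.getElem_drop]
        congr 1
      rw [he]
      exact hq

lemma ite_append2 (p : Bool) (row : List Int) :
    (if p then row ++ [(2:Int)] else row ++ [0]) = row ++ [if p then 2 else 0] := by
  cases p <;> rfl

lemma ite_beq_two (p : Bool) : ((if p then (2:Int) else 0) == 2) = p := by
  cases p <;> decide

lemma foldA (l : List Int) (p : Int → Bool) (acc : List Int) :
    l.foldl (fun row j => if p j then row ++ [2] else row ++ [0]) acc
      = acc ++ l.map (fun j => if p j then (2:Int) else 0) := by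
  rw [show (fun (row : List Int) (j : Int) => if p j then row ++ [(2:Int)] else row ++ [0])
        = fun row j => row ++ [if p j then (2:Int) else 0] from
      funext fun row => funext fun j => ite_append2 (p j) row]
  exact PySem.List.foldl_append_singleton_eq_map _ l acc

theorem pool_map_spec' (m : List (List Int)) (hpre : Pre_pool_map m) :
    pool_map m = pool_map_alt m := by
  obtain ⟨hne, hrow⟩ := hpre
  have hhead : PySem.List.pyGetD m 0 ([] : List Int) = m.headD [] := by
    cases m with
    | nil => exact absurd rfl hne
    | cons a t => exact PySem.List.pyGetD_zero_cons a t []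
  simp only [pool_map, pool_map_alt, hhead]
  rw [PySem.List.foldl_append_singleton_eq_map, PySem.List.foldl_append_singleton_eq_map]
  simp only [foldA, List.nil_append]
  have h20 : (0:ℤ) < 20 := by norm_num
  rw [PySem.List.pyRange_of_pos 0 ((m.headD []).length : ℤ) h20]
  simp only [List.map_map, List.length_map, List.length_range, zero_add, Int.sub_zero]
  set N : ℕ := (if (0:ℤ) < ((m.headD []).length:ℤ) then ((((m.headD []).length:ℤ) + 20 - 1) / 20).toNat else 0) with hNdef
  have hkN : ∀ k : ℕ, k < N → 20 * k < (m.headD []).length := by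
    intro k hk
    rw [hNdef] at hk
    by_cases hc : (0:ℤ) < ((m.headD []).length:ℤ)
    · rw [if_pos hc] at hk; omega
    · rw [if_neg hc] at hk; omega
  apply List.map_congr_left
  intro i hi
  obtain ⟨hi0, hilen, -⟩ := (PySem.List.mem_pyRange_iff_of_pos h20 i).mp hi
  obtain ⟨i', rfl⟩ : ∃ i' : ℕ, i = (i':ℤ) := ⟨i.toNat, (Int.toNat_of_nonneg hi0).symm⟩
  apply List.map_congr_left
  intro k hk
  rw [List.mem_range] at hk
  simp only [Function.comp_def]
  refine if_congr ?_ rfl rfl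
  -- LHS: any over the flatMap is a nested any; collapse the row window
  rw [List.any_flatMap]
  simp only [List.any_map, Function.comp_def]
  have h1 := window_any m
    (fun row => (PySem.List.pyRange (((20*k : ℕ)) : ℤ) (min ((((20*k : ℕ)) : ℤ) + 20) (((m.headD []).length : ℕ) : ℤ)) 1).any
      (fun jj => PySem.List.pyGetD row jj 0 == 2)) ([] : List Int) i' m.length (le_refl _)
  push_cast at h1
  rw [List.take_length] at h1
  simp only [h1]
  -- RHS: the slice of the mask table is a map over the same row window
  rw [PySem.List.slice_toNat _ (by positivity) (by positivity)]
  simp only [Int.toNat_natCast]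
  have ht : (((i' : ℤ)) + 20).toNat - i' = 20 := by omega
  rw [ht, ← List.map_drop, ← List.map_take, List.any_map]
  simp only [Function.comp_def]
  refine iff_of_eq (congrArg (· = true) ?_)
  apply PySem.List.any_congr_mem
  intro row hmem
  have hcle : (m.headD []).length ≤ row.length :=
    hrow row (List.mem_of_mem_drop (List.mem_of_mem_take hmem))
  rw [PySem.List.pyGetD_natCast, PySem.List.getD_map_range _ N k 0 hk, ite_beq_two,
    PySem.List.slice_zero_start, PySem.List.slice_to row (by positivity),
    PySem.List.slice_toNat _ (by positivity) (by positivity)]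
  have hB : ((20:ℤ) * ↑k + 20).toNat = 20 * k + 20 := by omega
  have hA : ((20:ℤ) * ↑k).toNat = 20 * k := by omega
  have hC : 20 * k + 20 - 20 * k = 20 := by omega
  rw [hB, hA, hC, Int.toNat_natCast]
  have h2 := window_any row (fun x => x == 2) (0:ℤ) (20 * k) (m.headD []).length hcle
  push_cast at h2
  rw [h2]
  exact List.any_beq'

-- ===== VERDICT (by name: the statement is the Claim_ definition above) =====
theorem pool_map_spec : Claim_equal_pool_map := by
  intro m _ hpre
  unfold Spec_pool_map
  exact pool_map_spec' m hpre
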